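-- pv_equiv track=rewrite | github.com/zentavious/PIIvot | eedi_piivot/engine/anonymizer.py | anonymize
-- ===== SOURCE A (Python) =====
-- from typing import List
--
-- def anonymize(message: str, labels: List[tuple[int, int, str]]):
--
--     # sort labels to ensure consistent indexing
--     labels = sorted(labels, key=lambda x: x[1])
--
--     for i in range(len(labels)):
--         label = labels[i]
--         message = message[:label[0]] + '[[' + label[2] + ']]' + message[label[1]:]
--         offset = len(f"[[{label[2]}]]")
--         labels[i] = (label[0], label[0] + offset, label[2])
--
--         # update down index label indicies by the new length of the
--         for j in range(i + 1,len(labels)):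
--             labels[j] = (labels[j][0] + offset, labels[j][1] + offset, labels[j][2])
--
--     return message, labels
-- ===== SOURCE B (Python) =====
-- from typing import List
--
-- def anonymize(message: str, labels: List[tuple[int, int, str]]):
--     # Single pass with a running cumulative offset: no quadratic re-shifting of later labels.
--     out = []
--     c = 0
--     for start, end, tag in sorted(labels, key=lambda x: x[1]):
--         token = '[[' + tag + ']]'
--         message = message[:start + c] + token + message[end + c:]
--         out.append((start + c, start + c + len(token), tag))
--         c += len(token)
--     return message, out
-- ===== Notes on version B (the rewrite author's own statement) =====
-- stated objective: faster
-- what changed: B replaces A's in-place quadratic pass (which re-shifts every later label after each substitution) by a single pass over the sorted labels that carries one running cumulative offset and emits each rewritten label directly.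
import Mathlib
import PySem

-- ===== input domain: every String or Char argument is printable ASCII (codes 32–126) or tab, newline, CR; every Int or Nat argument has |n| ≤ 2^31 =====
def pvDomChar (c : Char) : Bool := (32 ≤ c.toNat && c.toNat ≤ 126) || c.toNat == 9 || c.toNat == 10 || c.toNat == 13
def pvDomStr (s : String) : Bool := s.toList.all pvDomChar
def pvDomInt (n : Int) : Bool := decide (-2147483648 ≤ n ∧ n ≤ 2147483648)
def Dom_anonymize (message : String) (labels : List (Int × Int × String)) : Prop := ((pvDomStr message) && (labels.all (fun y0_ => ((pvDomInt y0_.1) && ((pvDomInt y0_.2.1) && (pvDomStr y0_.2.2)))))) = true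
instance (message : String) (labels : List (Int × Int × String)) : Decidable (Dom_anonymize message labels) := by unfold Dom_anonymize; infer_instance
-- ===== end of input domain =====

-- B replaces A's re-shifting of every later label after each substitution by one pass with a
-- running cumulative offset (objective: faster).

-- ===== PORT A =====
-- shift one label tuple by off (the body of A's inner j-loop)
def pvShift (off : Int) (x : Int × Int × String) : Int × Int × String :=
  (x.1 + off, x.2.1 + off, x.2.2)

-- A's inner loop 'for j in range(i+1, len(labels)): labels[j] = shifted labels[j]';
-- `fuel` counts the remaining iterations (Python fixes the range bound len(labels) at loop entry)
def anonInner (fuel : Nat) (labels : List (Int × Int × String)) (off : Int) (j : Nat) :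
    List (Int × Int × String) :=
  match fuel with
  | 0 => labels
  | fuel + 1 =>
    if h : j < labels.length then
      anonInner fuel (labels.set j (pvShift off labels[j])) off (j + 1)
    else labels

-- A's outer loop 'for i in range(len(labels)): …', again with the iteration count as fuel
def anonOuter (fuel : Nat) (message : String) (labels : List (Int × Int × String)) (i : Nat) :
    String × (List (Int × Int × String)) :=
  match fuel with
  | 0 => (message, labels)
  | fuel + 1 =>
    if h : i < labels.length then
      let label := labels[i]
      let message' := PySem.Str.slice message none (some label.1)
          ++ ("[[" ++ label.2.2 ++ "]]") ++ PySem.Str.slice message (some label.2.1) none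
      let off : Int := PySem.Str.len ("[[" ++ label.2.2 ++ "]]")
      anonOuter fuel message'
        (anonInner labels.length (labels.set i (label.1, label.1 + off, label.2.2)) off (i + 1))
        (i + 1)
    else (message, labels)

def anonymize (message : String) (labels : List (Int × Int × String)) :
    String × (List (Int × Int × String)) :=
  anonOuter (PySem.List.sorted labels (fun x => x.2.1) false).length message
    (PySem.List.sorted labels (fun x => x.2.1) false) 0

-- ===== PORT B =====
-- B's single pass: running cumulative offset c, output list built as we go
def anonLoop (message : String) (c : Int) :
    List (Int × Int × String) → String × (List (Int × Int × String))
  | [] => (message, [])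
  | (s, e, t) :: rest =>
    let token := "[[" ++ t ++ "]]"
    let message' := PySem.Str.slice message none (some (s + c))
        ++ token ++ PySem.Str.slice message (some (e + c)) none
    let r := anonLoop message' (c + PySem.Str.len token) rest
    (r.1, (s + c, s + c + PySem.Str.len token, t) :: r.2)

def anonymize_alt (message : String) (labels : List (Int × Int × String)) :
    String × (List (Int × Int × String)) :=
  anonLoop message 0 (PySem.List.sorted labels (fun x => x.2.1) false)

-- ===== PRECONDITION & SPEC =====
def Spec_anonymize (message : String) (labels : List (Int × Int × String)) (out : String × (List (Int × Int × String))) : Prop := out = anonymize_alt message labels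
instance (message : String) (labels : List (Int × Int × String)) (out : String × (List (Int × Int × String))) : Decidable (Spec_anonymize message labels out) := by unfold Spec_anonymize; infer_instance

-- ===== CLAIM (what is proved, stated in full; the proofs are below) =====
def Claim_equal_anonymize : Prop := ∀ (message : String) (labels : List (Int × Int × String)), Dom_anonymize message labels → Spec_anonymize message labels (anonymize message labels)

-- ===== LEMMAS AND PROOFS =====

-- A's inner loop, started after a processed prefix `done` with enough fuel, shifts every
-- remaining label by off
theorem anonInner_eq (rest : List (Int × Int × String)) (done : List (Int × Int × String))
    (off : Int) (fuel : Nat) (hf : rest.length ≤ fuel) :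
    anonInner fuel (done ++ rest) off done.length = done ++ rest.map (pvShift off) := by
  induction rest generalizing done fuel with
  | nil =>
    cases fuel with
    | zero => simp [anonInner]
    | succ fuel => simp [anonInner]
  | cons x rest ih =>
    cases fuel with
    | zero => simp at hf
    | succ fuel =>
      rw [anonInner]
      have hlt : done.length < (done ++ x :: rest).length := by simp
      rw [dif_pos hlt]
      have hget : (done ++ x :: rest)[done.length]'hlt = x := by
        rw [List.getElem_append_right (Nat.le_refl _)]; simp
      have hset : (done ++ x :: rest).set done.length (pvShift off ((done ++ x :: rest)[done.length]'hlt))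
          = (done ++ [pvShift off x]) ++ rest := by
        rw [hget, List.set_append]; simp
      rw [hset]
      have hlen : done.length + 1 = (done ++ [pvShift off x]).length := by simp
      rw [hlen, ih (done ++ [pvShift off x]) fuel (by simpa using Nat.le_of_succ_le_succ hf)]
      simp

-- pvShift composes: shifting by c then by off is shifting by c + off
theorem pvShift_comp (c off : Int) (x : Int × Int × String) :
    pvShift off (pvShift c x) = pvShift (c + off) x := by
  simp [pvShift]; constructor <;> ring

-- main invariant: A's outer loop, after a processed prefix `done` and with the remaining labels
-- already shifted by the cumulative offset c, computes exactly B's single pass from (message, c)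
theorem anonOuter_eq (rest : List (Int × Int × String)) (done : List (Int × Int × String))
    (message : String) (c : Int) (fuel : Nat) (hf : rest.length ≤ fuel) :
    anonOuter fuel message (done ++ rest.map (pvShift c)) done.length
      = ((anonLoop message c rest).1, done ++ (anonLoop message c rest).2) := by
  induction rest generalizing done message c fuel with
  | nil =>
    cases fuel with
    | zero => simp [anonOuter, anonLoop]
    | succ fuel => simp [anonOuter, anonLoop]
  | cons x rest ih =>
    obtain ⟨s, e, t⟩ := x
    cases fuel with
    | zero => simp at hf
    | succ fuel =>
      rw [anonOuter]
      simp only [List.map_cons]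
      have hlt : done.length < (done ++ (pvShift c (s, e, t) :: rest.map (pvShift c))).length := by
        simp
      rw [dif_pos hlt]
      have hget : (done ++ (pvShift c (s, e, t) :: rest.map (pvShift c)))[done.length]'hlt
          = (s + c, e + c, t) := by
        rw [List.getElem_append_right (Nat.le_refl _)]; simp [pvShift]
      simp only [hget]
      have hset : (done ++ (pvShift c (s, e, t) :: rest.map (pvShift c))).set done.length
            (s + c, s + c + PySem.Str.len ("[[" ++ t ++ "]]"), t)
          = (done ++ [(s + c, s + c + PySem.Str.len ("[[" ++ t ++ "]]"), t)]) ++ rest.map (pvShift c) := by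
        rw [List.set_append]; simp
      rw [hset]
      have hin := anonInner_eq (rest.map (pvShift c))
        (done ++ [(s + c, s + c + PySem.Str.len ("[[" ++ t ++ "]]"), t)])
        (PySem.Str.len ("[[" ++ t ++ "]]"))
        ((done ++ (pvShift c (s, e, t) :: rest.map (pvShift c))).length) (by simp only [List.length_append, List.length_map, List.length_cons]; omega)
      have hlen : done.length + 1
          = (done ++ [(s + c, s + c + PySem.Str.len ("[[" ++ t ++ "]]"), t)]).length := by simp
      rw [hlen, hin]
      have hmap : (rest.map (pvShift c)).map (pvShift (PySem.Str.len ("[[" ++ t ++ "]]")))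
          = rest.map (pvShift (c + PySem.Str.len ("[[" ++ t ++ "]]"))) := by
        rw [List.map_map]; exact List.map_congr_left (fun y _ => pvShift_comp c _ y)
      rw [hmap,
        ih (done ++ [(s + c, s + c + PySem.Str.len ("[[" ++ t ++ "]]"), t)]) _ _ fuel
          (Nat.le_of_succ_le_succ hf)]
      simp [anonLoop]

theorem pvShift_zero (x : Int × Int × String) : pvShift 0 x = x := by
  simp [pvShift]

-- ===== VERDICT (by name: the statement is the Claim_ definition above) =====
theorem anonymize_spec : Claim_equal_anonymize := by
  intro message labels _
  unfold Spec_anonymize anonymize anonymize_alt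
  have h := anonOuter_eq (PySem.List.sorted labels (fun x => x.2.1) false) [] message 0
    (PySem.List.sorted labels (fun x => x.2.1) false).length (Nat.le_refl _)
  rw [List.map_congr_left (fun y _ => pvShift_zero y), List.map_id'] at h
  simp only [List.nil_append, List.length_nil] at h
  rw [h]
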